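-- pv_equiv track=rewrite | github.com/RmnJL/nexora-storm | storm_resolver_daemon.py | stabilize_selection
-- ===== SOURCE A (Python) =====
-- def stabilize_selection(previous: list[str], selected: list[str], take: int) -> list[str]:
--     target_len = max(1, take)
--     selected_set = set(selected)
--     stable: list[str] = []
--
--     # Keep existing active resolvers first when still healthy to avoid flapping.
--     for resolver in previous:
--         if resolver in selected_set and resolver not in stable:
--             stable.append(resolver)
--             if len(stable) >= target_len:
--                 return stable
--
--     for resolver in selected:
--         if resolver not in stable:
--             stable.append(resolver)
--             if len(stable) >= target_len:
--                 return stable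
--
--     return stable[:target_len]
-- ===== SOURCE B (Python) =====
-- def stabilize_selection(previous: list[str], selected: list[str], take: int) -> list[str]:
--     # Score each distinct selected resolver: already-active ones keep their slot in
--     # `previous`, new ones are ranked after all of them in selection order; then the
--     # result is recovered by sorting the distinct resolvers by score and truncating.
--     def rank(r: str) -> int:
--         if r in previous:
--             return previous.index(r)
--         return len(previous) + selected.index(r)
--
--     return sorted(set(selected), key=rank)[:max(1, take)]
-- ===== Notes on version B (the rewrite author's own statement) =====
-- stated objective: alternative
-- what changed: Replaces A's sequential construction (two guarded loops appending to `stable` with interleaved early returns) by a scoring algorithm: each distinct selected resolver gets a numeric rank (its first index in `previous` if already active, else len(previous) plus its first index in `selected`), and the result is sorted(set(selected), key=rank)[:max(1, take)] — the output order comes from a sort over ranks, not from traversal order.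
import Mathlib
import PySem

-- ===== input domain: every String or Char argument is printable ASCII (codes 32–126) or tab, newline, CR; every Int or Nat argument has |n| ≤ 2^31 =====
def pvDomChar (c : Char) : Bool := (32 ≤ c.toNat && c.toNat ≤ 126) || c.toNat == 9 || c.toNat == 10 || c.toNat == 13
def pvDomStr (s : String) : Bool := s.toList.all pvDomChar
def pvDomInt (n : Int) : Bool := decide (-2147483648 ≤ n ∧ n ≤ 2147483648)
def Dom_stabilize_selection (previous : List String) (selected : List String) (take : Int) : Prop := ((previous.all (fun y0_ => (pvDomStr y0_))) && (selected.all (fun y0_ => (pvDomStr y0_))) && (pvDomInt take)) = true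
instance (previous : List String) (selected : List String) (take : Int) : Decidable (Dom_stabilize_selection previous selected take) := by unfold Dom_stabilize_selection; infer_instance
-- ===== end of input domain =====

-- B replaces A's sequential construction (two guarded append loops with early returns) by a
-- scoring algorithm: each distinct selected resolver gets a numeric rank (its slot in
-- `previous` if already active, else after all of previous in selection order), and the
-- result is sorted(set(selected), key=rank)[:max(1, take)].

-- ===== PORT A =====
-- second loop of A: 'for resolver in selected: …' with early return on reaching target_len,
-- then the final 'return stable[:target_len]'
def stabLoop2 (target : Nat) (stable : List String) : List String → List String
  | [] => stable.take target
  | r :: rest =>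
    if r ∈ stable then stabLoop2 target stable rest
    else
      let st := stable ++ [r]
      if target ≤ st.length then st else stabLoop2 target st rest

-- first loop of A: 'for resolver in previous: …', falling through into the second loop
def stabLoop1 (target : Nat) (selSet : PySem.Set String) (selected : List String)
    (stable : List String) : List String → List String
  | [] => stabLoop2 target stable selected
  | r :: rest =>
    if PySem.Set.contains selSet r ∧ r ∉ stable then
      let st := stable ++ [r]
      if target ≤ st.length then st else stabLoop1 target selSet selected st rest
    else stabLoop1 target selSet selected stable rest

def stabilize_selection (previous : List String) (selected : List String) (take : Int) : List String :=
  -- target_len = max(1, take) is ≥ 1, so representing it as a Nat is exact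
  let target : Nat := (max 1 take).toNat
  stabLoop1 target (PySem.Set.ofList selected) selected [] previous

-- ===== PORT B =====
-- Source B's nested 'def rank(r)': previous.index / selected.index are guarded by the membership
-- tests, so the '.getD 0' default of index? is never the returned branch's value on a miss
def stabRank (previous : List String) (selected : List String) (r : String) : Int :=
  if r ∈ previous then (((PySem.List.index? previous r).getD 0 : Nat) : Int)
  else (previous.length : Int) + (((PySem.List.index? selected r).getD 0 : Nat) : Int)

def stabilize_selection_alt (previous : List String) (selected : List String) (take : Int) : List String :=
  -- sorted(set(selected), key=rank)[:max(1, take)]; the slice bound is ≥ 1, so List.take is exact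
  (PySem.List.sorted (PySem.Set.ofList selected) (stabRank previous selected) false).take
    (max 1 take).toNat

-- ===== PRECONDITION & SPEC =====
def Spec_stabilize_selection (previous : List String) (selected : List String) (take : Int) (out : List String) : Prop := out = stabilize_selection_alt previous selected take
instance (previous : List String) (selected : List String) (take : Int) (out : List String) : Decidable (Spec_stabilize_selection previous selected take out) := by unfold Spec_stabilize_selection; infer_instance

-- ===== CLAIM (what is proved, stated in full; the proofs are below) =====
def Claim_equal_stabilize_selection : Prop := ∀ (previous : List String) (selected : List String) (take : Int), Dom_stabilize_selection previous selected take → Spec_stabilize_selection previous selected take (stabilize_selection previous selected take)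

-- ===== LEMMAS AND PROOFS =====

-- ---- A-side: the capped loops compute take target of the ordered dedup of (filtered previous ++ selected)

-- Set.add only ever appends, so the accumulator is a prefix of any further folding
theorem prefix_foldl_add (xs : List String) (s : List String) :
    s <+: List.foldl PySem.Set.add s xs := by
  induction xs generalizing s with
  | nil => exact List.prefix_refl s
  | cons x xs ih =>
    refine List.IsPrefix.trans ?_ (ih (PySem.Set.add s x))
    simp only [PySem.Set.add]
    split_ifs <;> simp

theorem take_of_prefix_length {s t : List String} (h : s <+: t) :
    t.take s.length = s := by
  obtain ⟨u, rfl⟩ := h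
  simp

theorem add_of_mem {s : List String} {r : String} (hm : r ∈ s) :
    PySem.Set.add s r = s := by
  simp [PySem.Set.add, PySem.Set.contains, hm]

theorem add_of_not_mem {s : List String} {r : String} (hm : r ∉ s) :
    PySem.Set.add s r = s ++ [r] := by
  simp [PySem.Set.add, PySem.Set.contains, hm]

-- the capped second loop computes the (truncated) running dedup of its remaining input
theorem stabLoop2_eq (target : Nat) (xs : List String) :
    ∀ stable : List String, stable.length < target →
      stabLoop2 target stable xs = (List.foldl PySem.Set.add stable xs).take target := by
  induction xs with
  | nil =>
    intro stable h
    simp [stabLoop2, List.take_of_length_le (le_of_lt h)]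
  | cons r rest ih =>
    intro stable h
    rw [List.foldl_cons]
    by_cases hm : r ∈ stable
    · rw [stabLoop2, if_pos hm, add_of_mem hm]
      exact ih stable h
    · rw [stabLoop2, if_neg hm, add_of_not_mem hm]
      by_cases hc : target ≤ (stable ++ [r]).length
      · rw [if_pos hc]
        have hlen : (stable ++ [r]).length = target := by
          simp only [List.length_append, List.length_singleton] at hc ⊢; omega
        rw [← hlen]
        exact (take_of_prefix_length (prefix_foldl_add rest (stable ++ [r]))).symm
      · rw [if_neg hc]
        exact ih (stable ++ [r]) (by omega)

-- the capped first loop filters by the selected set, then continues as loop 2 over selected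
theorem stabLoop1_eq (target : Nat) (selSet : PySem.Set String) (selected : List String)
    (xs : List String) :
    ∀ stable : List String, stable.length < target →
      stabLoop1 target selSet selected stable xs =
        (List.foldl PySem.Set.add stable
          (xs.filter (fun r => PySem.Set.contains selSet r) ++ selected)).take target := by
  induction xs with
  | nil =>
    intro stable h
    rw [stabLoop1, List.filter_nil, List.nil_append]
    exact stabLoop2_eq target selected stable h
  | cons r rest ih =>
    intro stable h
    cases hs : PySem.Set.contains selSet r with
    | false =>
      have hs' : r ∉ selSet := by simpa [PySem.Set.contains] using hs
      rw [stabLoop1, if_neg (by simp [hs']), List.filter_cons_of_neg (by simpa [PySem.Set.contains] using hs)]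
      exact ih stable h
    | true =>
      have hs' : r ∈ selSet := by simpa [PySem.Set.contains] using hs
      rw [List.filter_cons_of_pos (by simpa [PySem.Set.contains] using hs), List.cons_append,
        List.foldl_cons]
      by_cases hm : r ∈ stable
      · rw [stabLoop1, if_neg (by simp [hs', hm]), add_of_mem hm]
        exact ih stable h
      · rw [stabLoop1, if_pos (by simp [hs', hm]), add_of_not_mem hm]
        by_cases hc : target ≤ (stable ++ [r]).length
        · rw [if_pos hc]
          have hlen : (stable ++ [r]).length = target := by
            simp only [List.length_append, List.length_singleton] at hc ⊢; omega
          rw [← hlen]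
          exact (take_of_prefix_length (prefix_foldl_add _ (stable ++ [r]))).symm
        · rw [if_neg hc]
          exact ih (stable ++ [r]) (by omega)

-- ---- B-side: sorting set(selected) by stabRank reconstructs exactly that ordered dedup list

-- first-occurrence index (proof-side abbreviation for what rank/the dedup order are about)
def fidx (xs : List String) (r : String) : Nat := (PySem.List.index? xs r).getD 0

theorem fidx_cons_self (xs : List String) (x : String) : fidx (x :: xs) x = 0 := by
  unfold fidx
  rw [PySem.List.index?_cons_self]
  rfl

theorem fidx_cons_of_ne {x r : String} (xs : List String) (hne : x ≠ r) (hm : r ∈ xs) :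
    fidx (x :: xs) r = fidx xs r + 1 := by
  obtain ⟨k, hk⟩ := (PySem.List.index?_isSome_iff xs r).mpr hm |> Option.isSome_iff_exists.mp
  unfold fidx
  rw [PySem.List.index?_cons_of_ne xs hne, hk]
  rfl

theorem fidx_lt_length {xs : List String} {r : String} (hm : r ∈ xs) :
    fidx xs r < xs.length := by
  obtain ⟨k, hk⟩ := (PySem.List.index?_isSome_iff xs r).mpr hm |> Option.isSome_iff_exists.mp
  obtain ⟨hlt, -, -⟩ := PySem.List.getElem_of_index?_eq_some hk
  unfold fidx
  rw [hk]
  exact hlt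

theorem fidx_append_of_mem {l : List String} (t : List String) {r : String} (hm : r ∈ l) :
    fidx (l ++ t) r = fidx l r := by
  unfold fidx
  rw [PySem.List.index?_append_of_mem t hm]

theorem fidx_append_of_not_mem {l t : List String} {r : String} (hl : r ∉ l) (ht : r ∈ t) :
    fidx (l ++ t) r = l.length + fidx t r := by
  induction l with
  | nil => simp
  | cons x l ih =>
    have hx : x ≠ r := by rintro rfl; exact hl (List.mem_cons_self)
    have hl' : r ∉ l := fun h => hl (List.mem_cons_of_mem x h)
    rw [List.cons_append, fidx_cons_of_ne (l ++ t) hx (by simp [ht]), ih hl']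
    simp; omega

-- filtering preserves the relative order of first occurrences
theorem fidx_filter_mono (P : String → Bool) :
    ∀ (xs : List String) {a b : String}, a ∈ xs.filter P → b ∈ xs.filter P →
      fidx (xs.filter P) a < fidx (xs.filter P) b → fidx xs a < fidx xs b := by
  intro xs
  induction xs with
  | nil => intro a b ha _ _; simp at ha
  | cons x xs ih =>
    intro a b ha hb hlt
    have hamem : a ∈ x :: xs := List.mem_of_mem_filter (by simpa using ha)
    have hbmem : b ∈ x :: xs := List.mem_of_mem_filter (by simpa using hb)
    by_cases hPx : P x
    · rw [List.filter_cons_of_pos hPx] at ha hb hlt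
      by_cases hax : x = a
      · by_cases hbx : a = b
        · rw [← hbx] at hlt; exact absurd hlt (lt_irrefl _)
        · have hbf : b ∈ xs.filter P := by
            rcases List.mem_cons.mp hb with h | h
            · exact absurd (hax.symm.trans h.symm) hbx
            · exact h
          have hbxs : b ∈ xs := List.mem_of_mem_filter hbf
          rw [← hax, fidx_cons_self, fidx_cons_of_ne xs (hax.symm ▸ hbx) hbxs]
          omega
      · by_cases hbxeq : x = b
        · subst hbxeq
          rw [fidx_cons_self] at hlt; omega
        · have haf : a ∈ xs.filter P := by
            rcases List.mem_cons.mp ha with h | h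
            · exact absurd h.symm hax
            · exact h
          have hbf : b ∈ xs.filter P := by
            rcases List.mem_cons.mp hb with h | h
            · exact absurd h.symm hbxeq
            · exact h
          rw [fidx_cons_of_ne (xs.filter P) hax haf, fidx_cons_of_ne (xs.filter P) hbxeq hbf] at hlt
          have := ih haf hbf (by omega)
          rw [fidx_cons_of_ne xs hax (List.mem_of_mem_filter haf),
            fidx_cons_of_ne xs hbxeq (List.mem_of_mem_filter hbf)]
          omega
    · rw [List.filter_cons_of_neg (by simpa using hPx)] at ha hb hlt
      have hax : x ≠ a := by rintro rfl; exact hPx (List.of_mem_filter ha)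
      have hbx : x ≠ b := by rintro rfl; exact hPx (List.of_mem_filter hb)
      rw [fidx_cons_of_ne xs hax (List.mem_of_mem_filter ha),
        fidx_cons_of_ne xs hbx (List.mem_of_mem_filter hb)]
      exact Nat.succ_lt_succ (ih ha hb hlt)

-- the running dedup, unfolded one element at a time
theorem foldl_add_eq_append_filter (xs : List String) :
    ∀ s : List String, List.foldl PySem.Set.add s xs =
      s ++ (PySem.Set.ofList xs).filter (fun r => decide (r ∉ s)) := by
  induction xs with
  | nil => intro s; simp [PySem.Set.ofList]
  | cons y xs ih =>
    intro s
    have hy : PySem.Set.ofList (y :: xs) = y :: (PySem.Set.ofList xs).filter (fun r => decide (r ∉ ([y] : List String))) := by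
      show List.foldl PySem.Set.add [] (y :: xs) = _
      rw [List.foldl_cons, show PySem.Set.add [] y = [y] from rfl, ih [y]]
      simp
    rw [List.foldl_cons, hy]
    by_cases hm : y ∈ s
    · rw [add_of_mem hm, ih s]
      congr 1
      rw [List.filter_cons_of_neg (by simp [hm]), List.filter_filter]
      refine List.filter_congr (fun r _ => ?_)
      by_cases hr : r ∈ s
      · simp [hr]
      · have : r ≠ y := by rintro rfl; exact hr hm
        simp [hr, this]
    · rw [add_of_not_mem hm, ih (s ++ [y])]
      rw [List.filter_cons_of_pos (by simp [hm]), List.filter_filter]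
      simp only [List.append_assoc, List.singleton_append]
      congr 2
      refine List.filter_congr (fun r _ => ?_)
      by_cases hry : r = y
      · simp [hry]
      · simp [hry]

theorem dedup_cons (x : String) (xs : List String) :
    PySem.List.dedup (x :: xs) =
      x :: (PySem.List.dedup xs).filter (fun r => decide (r ≠ x)) := by
  rw [PySem.List.dedup_eq_ofList, PySem.List.dedup_eq_ofList]
  show List.foldl PySem.Set.add [] (x :: xs) = _
  rw [List.foldl_cons, show PySem.Set.add [] x = [x] from rfl,
    foldl_add_eq_append_filter xs [x]]
  simp [PySem.Set.ofList]

-- the ordered dedup lists elements in strictly increasing order of first occurrence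
theorem dedup_pairwise_fidx (xs : List String) :
    (PySem.List.dedup xs).Pairwise (fun a b => fidx xs a < fidx xs b) := by
  induction xs with
  | nil => simp [PySem.List.dedup, PySem.Set.ofList]
  | cons x xs ih =>
    rw [dedup_cons]
    refine List.Pairwise.cons ?_ ?_
    · intro b hb
      have hbx : b ≠ x := by simpa using (List.of_mem_filter hb)
      have hbxs : b ∈ xs := by
        have := List.mem_of_mem_filter hb
        simpa [PySem.List.mem_dedup] using this
      rw [fidx_cons_self, fidx_cons_of_ne xs (Ne.symm hbx) hbxs]
      omega
    · refine List.Pairwise.imp_of_mem ?_ (ih.filter _)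
      intro a b ha hb hlt
      have hax : a ≠ x := by simpa using (List.of_mem_filter ha)
      have hbx : b ≠ x := by simpa using (List.of_mem_filter hb)
      have haxs : a ∈ xs := by
        simpa [PySem.List.mem_dedup] using (List.mem_of_mem_filter ha)
      have hbxs : b ∈ xs := by
        simpa [PySem.List.mem_dedup] using (List.mem_of_mem_filter hb)
      rw [fidx_cons_of_ne xs (Ne.symm hax) haxs, fidx_cons_of_ne xs (Ne.symm hbx) hbxs]
      omega

-- rank is strictly monotone in the first-occurrence order of (filtered previous ++ selected)
theorem stabRank_mono (previous selected : List String) {a b : String}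
    (ha : a ∈ selected) (hb : b ∈ selected)
    (hlt : fidx (previous.filter (fun r => PySem.Set.contains (PySem.Set.ofList selected) r) ++ selected) a
         < fidx (previous.filter (fun r => PySem.Set.contains (PySem.Set.ofList selected) r) ++ selected) b) :
    stabRank previous selected a < stabRank previous selected b := by
  set P : String → Bool := fun r => PySem.Set.contains (PySem.Set.ofList selected) r with hP
  have hPsel : ∀ r ∈ selected, P r = true := by
    intro r hr
    simp [hP, PySem.Set.contains, PySem.Set.mem_ofList, hr]
  have hFprev : ∀ r, r ∈ previous.filter P → r ∈ previous := fun r => List.mem_of_mem_filter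
  unfold stabRank
  by_cases hap : a ∈ previous
  · have haF : a ∈ previous.filter P := List.mem_filter.mpr ⟨hap, hPsel a ha⟩
    rw [fidx_append_of_mem selected haF] at hlt
    by_cases hbp : b ∈ previous
    · have hbF : b ∈ previous.filter P := List.mem_filter.mpr ⟨hbp, hPsel b hb⟩
      rw [fidx_append_of_mem selected hbF] at hlt
      have hmono := fidx_filter_mono P previous haF hbF hlt
      unfold fidx at hmono
      rw [if_pos hap, if_pos hbp]
      exact_mod_cast hmono
    · have hbF : b ∉ previous.filter P := fun h => hbp (hFprev b h)
      rw [if_pos hap, if_neg hbp]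
      have h1 := fidx_lt_length (xs := previous) hap
      unfold fidx at h1
      omega
  · have haF : a ∉ previous.filter P := fun h => hap (hFprev a h)
    rw [fidx_append_of_not_mem haF ha] at hlt
    by_cases hbp : b ∈ previous
    · have hbF : b ∈ previous.filter P := List.mem_filter.mpr ⟨hbp, hPsel b hb⟩
      rw [fidx_append_of_mem selected hbF] at hlt
      have hblt := fidx_lt_length (xs := previous.filter P) hbF
      exact absurd hlt (by omega)
    · have hbF : b ∉ previous.filter P := fun h => hbp (hFprev b h)
      rw [fidx_append_of_not_mem hbF hb] at hlt
      rw [if_neg hap, if_neg hbp]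
      unfold fidx at hlt
      omega

-- B's sorted-by-rank list IS the ordered dedup of (filtered previous ++ selected)
theorem sorted_rank_eq_dedup (previous selected : List String) :
    PySem.List.sorted (PySem.Set.ofList selected) (stabRank previous selected) false =
      PySem.List.dedup (previous.filter (fun r => PySem.Set.contains (PySem.Set.ofList selected) r) ++ selected) := by
  set C := previous.filter (fun r => PySem.Set.contains (PySem.Set.ofList selected) r) ++ selected with hC
  have hmemC : ∀ x, x ∈ C ↔ x ∈ selected := by
    intro x
    constructor
    · intro h
      rcases List.mem_append.mp h with h | h
      · have := List.of_mem_filter h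
        simpa [PySem.Set.contains, PySem.Set.mem_ofList] using this
      · exact h
    · intro h; exact List.mem_append.mpr (Or.inr h)
  have hperm : (PySem.List.dedup C).Perm (PySem.Set.ofList selected) := by
    refine (List.perm_ext_iff_of_nodup (PySem.List.nodup_dedup C) (PySem.Set.nodup_ofList selected)).mpr ?_
    intro x
    rw [PySem.List.mem_dedup, PySem.Set.mem_ofList, hmemC]
  have hpair : (PySem.List.dedup C).Pairwise
      (fun a b => stabRank previous selected a < stabRank previous selected b) := by
    refine List.Pairwise.imp_of_mem ?_ (dedup_pairwise_fidx C)
    intro a b ha hb hlt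
    have ha' : a ∈ selected := (hmemC a).mp ((PySem.List.mem_dedup C a).mp ha)
    have hb' : b ∈ selected := (hmemC b).mp ((PySem.List.mem_dedup C b).mp hb)
    exact stabRank_mono previous selected ha' hb' hlt
  exact PySem.List.sorted_eq_of_perm_of_pairwise_lt _ _ _ hperm hpair

-- ===== VERDICT (by name: the statement is the Claim_ definition above) =====
theorem stabilize_selection_spec : Claim_equal_stabilize_selection := by
  intro previous selected take _
  unfold Spec_stabilize_selection stabilize_selection stabilize_selection_alt
  have htpos : 0 < (max 1 take).toNat := by
    have : (1 : Int) ≤ max 1 take := le_max_left _ _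
    omega
  rw [stabLoop1_eq _ _ _ _ [] htpos, sorted_rank_eq_dedup]
  simp only [PySem.List.dedup_eq_ofList, PySem.Set.ofList_eq_foldl]
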